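-- pv_equiv track=rewrite | github.com/boda26/artificial-intelligence-projects | template4/viterbi_1.py | count_tag_word
-- ===== SOURCE A (Python) =====
-- def count_tag_word(train):
--     tag_map = {}
--     tag_word_map = {}
--     for sentence in train:
--         for word, tag in sentence:
--             tag_map[tag] = tag_map[tag] + 1 if tag in tag_map else 1
--     for t in tag_map:
--         tag_word_map[t] = {}
--         for sentence in train:
--             for word, tag in sentence:
--                 if tag == t:
--                     tag_word_map[t][word] = tag_word_map[t][word] + 1 if word in tag_word_map[t] else 1
--     return tag_map, tag_word_map
-- ===== SOURCE B (Python) =====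
-- def count_tag_word(train):
--     tag_word_map = {}
--     for sentence in train:
--         for word, tag in sentence:
--             d = tag_word_map.setdefault(tag, {})
--             d[word] = d.get(word, 0) + 1
--     tag_map = {t: sum(d.values()) for t, d in tag_word_map.items()}
--     return tag_map, tag_word_map
-- ===== Notes on version B (the rewrite author's own statement) =====
-- stated objective: faster
-- what changed: Single pass building the per-tag word table first (eliminating A's full-corpus rescan per distinct tag), then deriving tag totals by summing each tag's word counts instead of a separate counting pass.
import Mathlib
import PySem

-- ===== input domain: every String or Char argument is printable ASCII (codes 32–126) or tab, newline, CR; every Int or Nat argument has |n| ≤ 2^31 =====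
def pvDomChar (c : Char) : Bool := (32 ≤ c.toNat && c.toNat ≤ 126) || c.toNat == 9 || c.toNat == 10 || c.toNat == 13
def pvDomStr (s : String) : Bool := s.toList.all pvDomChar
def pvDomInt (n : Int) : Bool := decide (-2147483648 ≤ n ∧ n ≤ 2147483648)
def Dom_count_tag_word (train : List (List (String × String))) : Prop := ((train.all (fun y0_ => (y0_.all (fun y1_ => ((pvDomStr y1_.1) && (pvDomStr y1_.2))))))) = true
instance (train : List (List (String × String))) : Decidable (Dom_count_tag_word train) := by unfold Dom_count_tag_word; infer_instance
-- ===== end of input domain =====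

-- B builds the per-tag word table in ONE pass and derives tag totals by summing it,
-- instead of A's separate tag-count pass plus one full-corpus rescan per distinct tag (measured faster).

-- ===== PORT A =====
def count_tag_word (train : List (List (String × String))) : (List (String × Int)) × (List (String × List (String × Int))) :=
  let tag_map : PySem.Dict String Int :=
    train.foldl (fun d s => s.foldl (fun d wt =>
      d.insert wt.2 (if d.contains wt.2 then d.getD wt.2 0 + 1 else 1)) d) PySem.Dict.empty
  let tag_word_map : PySem.Dict String (PySem.Dict String Int) :=
    tag_map.keys.foldl (fun m t =>
      train.foldl (fun m s => s.foldl (fun m wt =>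
        if wt.2 == t then
          m.insert t ((m.getD t PySem.Dict.empty).insert wt.1
            (if (m.getD t PySem.Dict.empty).contains wt.1 then
              (m.getD t PySem.Dict.empty).getD wt.1 0 + 1 else 1))
        else m) m) (m.insert t PySem.Dict.empty)) PySem.Dict.empty
  (tag_map.items, tag_word_map.items.map (fun p => (p.1, p.2.items)))

-- ===== PORT B =====
def count_tag_word_alt (train : List (List (String × String))) : (List (String × Int)) × (List (String × List (String × Int))) :=
  let tag_word_map : PySem.Dict String (PySem.Dict String Int) :=
    train.foldl (fun m s => s.foldl (fun m wt =>
      m.modify wt.2 PySem.Dict.empty (fun d => d.modify wt.1 0 (· + 1))) m) PySem.Dict.empty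
  let tag_map : List (String × Int) := tag_word_map.items.map (fun p => (p.1, p.2.values.sum))
  (tag_map, tag_word_map.items.map (fun p => (p.1, p.2.items)))

-- ===== PRECONDITION & SPEC =====
def Spec_count_tag_word (train : List (List (String × String))) (out : (List (String × Int)) × (List (String × List (String × Int)))) : Prop := out = count_tag_word_alt train
instance (train : List (List (String × String))) (out : (List (String × Int)) × (List (String × List (String × Int)))) : Decidable (Spec_count_tag_word train out) := by unfold Spec_count_tag_word; infer_instance

-- ===== CLAIM (what is proved, stated in full; the proofs are below) =====
def Claim_equal_count_tag_word : Prop := ∀ (train : List (List (String × String))), Dom_count_tag_word train → Spec_count_tag_word train (count_tag_word train)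

-- ===== LEMMAS AND PROOFS =====

-- words of tag t, in corpus order
def pvWords (t : String) (ps : List (String × String)) : List String :=
  (ps.filter (fun wt => wt.2 == t)).map (·.1)

-- A's tag_map is Counter(tags)
-- the word-level counting step with A's 'in' test is the getD-based step
theorem pvStepW :
    (fun (d : PySem.Dict String Int) (w : String) =>
      d.insert w (if d.contains w then d.getD w 0 + 1 else 1))
    = fun d w => d.insert w (d.getD w 0 + 1) := by
  funext d w
  by_cases h : d.contains w = true
  · rw [if_pos h]
  · rw [if_neg h, PySem.Dict.getD_of_not_contains d 0 (Bool.eq_false_iff.mpr h)]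
    norm_num

theorem pvA_tagmap (ps : List (String × String)) :
    ps.foldl (fun d wt =>
      d.insert wt.2 (if d.contains wt.2 then d.getD wt.2 0 + 1 else 1)) PySem.Dict.empty
    = PySem.Dict.counter (ps.map (·.2)) := by
  have hf : (fun (d : PySem.Dict String Int) (wt : String × String) =>
      d.insert wt.2 (if d.contains wt.2 then d.getD wt.2 0 + 1 else 1))
      = fun d wt => d.insert wt.2 (d.getD wt.2 0 + 1) := by
    funext d wt
    exact congrFun (congrFun pvStepW d) wt.2
  rw [hf, ← PySem.Dict.foldl_insert_getD_add_one_eq_counter, List.foldl_map]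

-- A's per-tag scan, run on m.insert t d, nets to a single insert at t
theorem pvA_inner (t : String) (ps : List (String × String)) :
    ∀ (m : PySem.Dict String (PySem.Dict String Int)) (d : PySem.Dict String Int),
    ps.foldl (fun m wt =>
      if wt.2 == t then
        m.insert t ((m.getD t PySem.Dict.empty).insert wt.1
          (if (m.getD t PySem.Dict.empty).contains wt.1 then
            (m.getD t PySem.Dict.empty).getD wt.1 0 + 1 else 1))
      else m) (m.insert t d)
    = m.insert t ((pvWords t ps).foldl (fun d w =>
        d.insert w (if d.contains w then d.getD w 0 + 1 else 1)) d) := by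
  induction ps with
  | nil => intro m d; simp [pvWords]
  | cons a l ih =>
    intro m d
    rw [List.foldl_cons]
    by_cases h : (a.2 == t) = true
    · rw [if_pos h, PySem.Dict.getD_insert_self, PySem.Dict.insert_insert_self, ih m _]
      congr 1
      simp [pvWords, h]
    · rw [if_neg h, ih m d]
      congr 2
      simp [pvWords, h]

-- B's big fold, looked up at t, is the inner counting fold over the words of tag t
theorem pvB_getD (t : String) (ps : List (String × String)) :
    ∀ (m : PySem.Dict String (PySem.Dict String Int)),
    (ps.foldl (fun m wt =>
      m.modify wt.2 PySem.Dict.empty (fun d => d.modify wt.1 0 (· + 1))) m).getD t PySem.Dict.empty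
    = (pvWords t ps).foldl (fun d w => d.modify w 0 (· + 1)) (m.getD t PySem.Dict.empty) := by
  induction ps with
  | nil => intro m; simp [pvWords]
  | cons a l ih =>
    intro m
    rw [List.foldl_cons, ih]
    by_cases h : (a.2 == t) = true
    · have ht : t = a.2 := (beq_iff_eq.mp h).symm
      subst ht
      rw [PySem.Dict.getD_modify, if_pos rfl]
      simp [pvWords]
    · rw [PySem.Dict.getD_modify, if_neg (fun e => h (by simp [e]))]
      simp [pvWords, h]

theorem pvCounter_values_sum (xs : List String) :
    (PySem.Dict.counter xs).values.sum = (xs.length : Int) := by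
  rw [PySem.Dict.values_eq_map_keys _ (PySem.Dict.nodup_keys_counter xs) 0,
    PySem.Dict.keys_counter]
  have hperm : (PySem.Set.ofList xs).Perm xs.dedup :=
    (List.perm_ext_iff_of_nodup (PySem.Set.nodup_ofList xs) xs.nodup_dedup).mpr
      (fun a => by simp [PySem.Set.mem_ofList, List.mem_dedup])
  calc ((PySem.Set.ofList xs).map (fun k => (PySem.Dict.counter xs).getD k 0)).sum
      = ((xs.dedup).map (fun k => (PySem.Dict.counter xs).getD k 0)).sum :=
        (hperm.map _).sum_eq
    _ = ((xs.dedup).map (fun k => ((xs.count k : Nat) : Int))).sum := by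
        simp [PySem.Dict.getD_counter]
    _ = (xs.length : Int) := by
        rw [show (fun k => ((xs.count k : Nat) : Int)) = (fun n : Nat => (n : Int)) ∘ (fun k => xs.count k) from rfl,
          ← List.map_map, ← Nat.cast_list_sum]
        norm_cast
        exact List.sum_map_count_dedup_eq_length xs



theorem pvWords_length (t : String) (ps : List (String × String)) :
    (pvWords t ps).length = (ps.map (·.2)).count t := by
  simp [pvWords, List.count, List.countP_map, Function.comp_def, ← List.countP_eq_length_filter]

-- ===== VERDICT (by name: the statement is the Claim_ definition above) =====
theorem count_tag_word_spec : Claim_equal_count_tag_word := by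
  intro train _
  unfold Spec_count_tag_word
  simp only [count_tag_word, count_tag_word_alt]
  -- A's first pass is Counter of the tag sequence
  have h1 : train.foldl (fun d s => s.foldl (fun d wt =>
      d.insert wt.2 (if d.contains wt.2 then d.getD wt.2 0 + 1 else 1)) d) PySem.Dict.empty
      = PySem.Dict.counter (train.flatten.map (·.2)) := by
    rw [← List.foldl_flatten, pvA_tagmap]
  -- B's single pass, flattened
  have h2 : train.foldl (fun m s => s.foldl (fun m wt =>
      m.modify wt.2 PySem.Dict.empty (fun d => d.modify wt.1 0 (· + 1))) m)
      (PySem.Dict.empty : PySem.Dict String (PySem.Dict String Int))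
      = List.foldl (fun m wt =>
          m.modify wt.2 PySem.Dict.empty (fun d => d.modify wt.1 0 (· + 1)))
          PySem.Dict.empty train.flatten := by
    rw [← List.foldl_flatten]
  rw [h1, h2]
  set ps := train.flatten with hps
  set tags := ps.map (·.2) with htags
  set twm : PySem.Dict String (PySem.Dict String Int) := List.foldl (fun m wt =>
      m.modify wt.2 PySem.Dict.empty (fun d => d.modify wt.1 0 (· + 1)))
      PySem.Dict.empty ps with htwm
  -- B's table: keys, nodup, contents
  have hkeys : twm.keys = PySem.Set.ofList tags := by
    rw [htwm, PySem.Dict.keys_foldl_modify_key ps (·.2) PySem.Dict.empty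
      (fun _ wt => fun d => d.modify wt.1 0 (· + 1)) PySem.Dict.empty]
    simp [PySem.Set.update_nil_left, htags]
  have hnodup : twm.keys.Nodup := by
    rw [hkeys]; exact PySem.Set.nodup_ofList tags
  have hget : ∀ t, twm.getD t PySem.Dict.empty = PySem.Dict.counter (pvWords t ps) := by
    intro t
    rw [htwm, pvB_getD t ps PySem.Dict.empty, PySem.Dict.getD_empty,
      PySem.Dict.counter_eq_foldl]
  have hBitems : twm.items
      = (PySem.Set.ofList tags).map (fun t => (t, PySem.Dict.counter (pvWords t ps))) := by
    rw [PySem.Dict.items_eq_map_keys twm hnodup PySem.Dict.empty, hkeys]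
    exact List.map_congr_left (fun t _ => by rw [hget t])
  -- A's second phase nets to one insert per distinct tag
  have hiter : (fun (m : PySem.Dict String (PySem.Dict String Int)) (t : String) =>
      train.foldl (fun m s => s.foldl (fun m wt =>
        if wt.2 == t then
          m.insert t ((m.getD t PySem.Dict.empty).insert wt.1
            (if (m.getD t PySem.Dict.empty).contains wt.1 then
              (m.getD t PySem.Dict.empty).getD wt.1 0 + 1 else 1))
        else m) m) (m.insert t PySem.Dict.empty))
      = fun m t => m.insert t (PySem.Dict.counter (pvWords t ps)) := by
    funext m t
    rw [← List.foldl_flatten, ← hps, pvA_inner t ps m PySem.Dict.empty, pvStepW,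
      PySem.Dict.foldl_insert_getD_add_one_eq_counter]
  rw [hiter, PySem.Dict.keys_counter]
  have hAitems : (List.foldl (fun m t => m.insert t (PySem.Dict.counter (pvWords t ps)))
      PySem.Dict.empty (PySem.Set.ofList tags)).items
      = (PySem.Set.ofList tags).map (fun t => (t, PySem.Dict.counter (pvWords t ps))) := by
    rw [PySem.Dict.items_foldl_insert_fresh (PySem.Set.ofList tags) (fun t => t)
      (fun t => PySem.Dict.counter (pvWords t ps)) PySem.Dict.empty
      (fun a _ => PySem.Dict.contains_empty a)
      (by simp [PySem.Set.nodup_ofList])]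
    rfl
  rw [hAitems, hBitems]
  -- second components are now identical; compare the tag-total lists elementwise
  refine Prod.ext ?_ rfl
  show (PySem.Dict.counter tags).items
      = List.map (fun p => (p.1, p.2.values.sum))
          ((PySem.Set.ofList tags).map (fun t => (t, PySem.Dict.counter (pvWords t ps))))
  rw [PySem.Dict.items_counter, List.map_map]
  refine List.map_congr_left (fun t _ => ?_)
  simp only [Function.comp_def]
  rw [pvCounter_values_sum, pvWords_length]
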